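-- pv_equiv track=rewrite | github.com/shaneweisz/FooBar | Level 4/solution.py | solution
-- ===== SOURCE A (Python) =====
-- from itertools import permutations
--
-- def solution(times, times_limit):
--     num_vertices = len(times)
--
--     # 1. Compute the shortest paths between any vertex and any
--     #    other vertex using Floyd-Warshall
--
--     shortest_paths = floyd_warshall(times)
--
--     # 2. Check for a negative cycle. If there is a negative cycle,
--     #    all the bunnies can be collected since as much time as needed
--     #    can be gained by repeatedly traversing this cycle
--
--     if is_negative_cycle(shortest_paths):
--         num_bunnies = num_vertices - 2  # excluding the start and bulkhead
--         all_bunnies = list(range(num_bunnies))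
--         return all_bunnies
--
--     # 3. Enumerate the possible permutations of bunnies that can be collected.
--     #    evaluating the least time needed to collect each permutation of bunnies
--     #    in that order, and storing the permutation that collects the most bunnies
--     #    but satisfies the time constraint.
--
--     first_bunny = 1
--     last_bunny = num_vertices - 2
--     bunnies = range(first_bunny, last_bunny + 1)
--
--     answer = []
--     max_bunnies = 0
--     for perm_size in range(1, len(bunnies)+1):
--         for bunnies_perm in permutations(bunnies, perm_size):
--             time_taken = least_time_to_collect(bunnies_perm, shortest_paths)
--
--             if time_taken <= times_limit and perm_size > max_bunnies:
--                 max_bunnies = perm_size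
--                 answer = sorted(bunnies_perm)
--
--     # Adjustment for vertex i corresponding to bunny i - 1
--     return [x - 1 for x in answer]  # change bunny 1 to index 0 etc
--
-- def floyd_warshall(times):
--     """
--     Applies the Floyd-Warshall algorithm to computes a matrix with the time
--     taken on the shortest paths between any vertex and any other vertex.
--     """
--     shortest_paths = list(times)  # make a copy of times
--     num_vertices = len(times)
--
--     for k in range(num_vertices):
--         for i in range(num_vertices):
--             for j in range(num_vertices):
--                 shortest_paths[i][j] = min(shortest_paths[i][j],
--                                            shortest_paths[i][k] + shortest_paths[k][j])
--
--     return shortest_paths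
--
-- def is_negative_cycle(shortest_paths):
--     """
--     Returns True if there is a path from a vertex to itself
--     that takes negative time, else returns False.
--     """
--     n = len(shortest_paths)
--     for i in range(n):
--         if shortest_paths[i][i] < 0:  # Then there is a negative cycle
--             return True
--     return False
--
-- def least_time_to_collect(bunnies, shortest_paths):
--     """
--     Returns the least amount of time needed to collect the bunnies in
--     `bunnies` in the given order, using the `shortest_paths` matrix.
--
--     e.g. if `bunnies = [1, 3, 4]`, then this returns the least time needed to
--     collect the bunny at vertex 1 (starting at vertex 0), then the one at
--     vertex 3, and finallly the bunny at vertex 4, before returning to the bulkhead.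
--     """
--     # Path from start to first bunny
--     start = 0
--     first_bunny = bunnies[0]
--     time_taken = shortest_paths[start][first_bunny]
--
--     # Successive paths from first bunny through to last bunny
--     for curr_bunny, next_bunny in zip(bunnies, bunnies[1:]):
--         time_taken += shortest_paths[curr_bunny][next_bunny]
--
--     # Path from last bunny to bulkhead
--     bulkhead = -1
--     last_bunny = bunnies[-1]
--     time_taken += shortest_paths[last_bunny][bulkhead]
--
--     return time_taken
-- ===== SOURCE B (Python) =====
-- def solution(times, times_limit):
--     # Same in-place Floyd-Warshall (mutates `times` rows like A); then DFS in
--     # lexicographic order for the first feasible permutation, largest size first.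
--     n = len(times)
--     d = list(times)
--     for k in range(n):
--         for i in range(n):
--             for j in range(n):
--                 if d[i][k] + d[k][j] < d[i][j]:
--                     d[i][j] = d[i][k] + d[k][j]
--     if any(d[i][i] < 0 for i in range(n)):
--         return list(range(n - 2))
--
--     bunnies = list(range(1, n - 1))
--
--     def dfs(v, remaining, need, cost):
--         # lex-first feasible ordering of `need` bunnies from `remaining`,
--         # starting at vertex v with `cost` already spent; None if infeasible
--         if need == 0:
--             return [] if cost + d[v][-1] <= times_limit else None
--         for idx, u in enumerate(remaining):
--             r = dfs(u, remaining[:idx] + remaining[idx + 1:], need - 1,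
--                     cost + d[v][u])
--             if r is not None:
--                 return [u] + r
--         return None
--
--     def search(k):
--         if k == 0:
--             return None
--         r = dfs(0, bunnies, k, 0)
--         return r if r is not None else search(k - 1)
--
--     best = search(len(bunnies))
--     if best is None:
--         return []
--     return [x - 1 for x in sorted(best)]
-- ===== Notes on version B (the rewrite author's own statement) =====
-- stated objective: alternative
-- what changed: A enumerates every k-permutation of the bunnies for every size k (ascending) and keeps the last improvement; B runs a lexicographic DFS that returns at the first feasible ordering, trying sizes largest-first with early exit.
import Mathlib
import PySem

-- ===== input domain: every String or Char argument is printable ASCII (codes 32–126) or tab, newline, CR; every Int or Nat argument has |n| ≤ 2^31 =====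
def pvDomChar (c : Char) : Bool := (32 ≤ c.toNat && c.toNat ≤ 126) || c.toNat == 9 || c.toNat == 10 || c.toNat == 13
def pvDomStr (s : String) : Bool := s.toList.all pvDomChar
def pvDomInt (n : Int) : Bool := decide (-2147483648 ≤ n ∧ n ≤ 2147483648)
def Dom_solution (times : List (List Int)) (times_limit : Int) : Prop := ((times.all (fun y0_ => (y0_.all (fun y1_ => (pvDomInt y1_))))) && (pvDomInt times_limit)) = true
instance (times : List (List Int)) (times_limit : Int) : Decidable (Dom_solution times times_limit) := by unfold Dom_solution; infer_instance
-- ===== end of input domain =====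

-- B replaces A's full enumeration of all k-permutations (kept-last fold over ascending
-- sizes) by a lexicographic DFS that returns the FIRST feasible ordering, searching
-- sizes largest-first with early exit; return-value equivalence only — both Pythons
-- mutate `times` in place via the shared Floyd-Warshall preprocessing.

-- ===== PORT A =====
-- shared with port B: both Python sources contain this identical in-place Floyd-Warshall
def pvEntry (m : List (List Int)) (i j : Nat) : Int := (m.getD i []).getD j 0
def pvSet (m : List (List Int)) (i j : Nat) (v : Int) : List (List Int) :=
  m.set i ((m.getD i []).set j v)
def pvFW (times : List (List Int)) : List (List Int) :=
  let n := times.length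
  (List.range n).foldl (fun m k =>
    (List.range n).foldl (fun m i =>
      (List.range n).foldl (fun m j =>
        pvSet m i j (min (pvEntry m i j) (pvEntry m i k + pvEntry m k j))) m) m) times
def pvNeg (m : List (List Int)) : Bool :=
  (List.range m.length).any (fun i => pvEntry m i i < 0)
-- d[v][u] with Python int indices, and d[v][-1] (the bulkhead column)
def pvGetI (d : List (List Int)) (v u : Int) : Int :=
  (PySem.List.pyGet? ((PySem.List.pyGet? d v).getD []) u).getD 0
def pvBulk (d : List (List Int)) (v : Int) : Int :=
  (PySem.List.pyGet? ((PySem.List.pyGet? d v).getD []) (-1)).getD 0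

-- itertools.permutations(l, k): picks by index position, lexicographic
def permsA : Nat → List Int → List (List Int)
  | 0, _ => [[]]
  | k+1, l => (List.range l.length).flatMap
      (fun i => (permsA k (l.eraseIdx i)).map (fun p => l.getD i 0 :: p))

-- least_time_to_collect
def costA (d : List (List Int)) (p : List Int) : Int :=
  match p with
  | [] => 0
  | f :: _ =>
      (p.zip p.tail).foldl (fun t cn => t + pvGetI d cn.1 cn.2) (pvGetI d 0 f)
        + pvBulk d ((PySem.List.pyGet? p (-1)).getD 0)

def solution (times : List (List Int)) (times_limit : Int) : List Int :=
  let d := pvFW times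
  if pvNeg d then PySem.List.pyRange 0 ((times.length : Int) - 2) 1
  else
    let bunnies := PySem.List.pyRange 1 ((times.length : Int) - 2 + 1) 1
    let res := (List.range bunnies.length).foldl (fun (st : List Int × Nat) i =>
        let ps := i + 1
        (permsA ps bunnies).foldl (fun st p =>
          if costA d p ≤ times_limit ∧ st.2 < ps
          then (PySem.List.sorted p id false, ps) else st) st)
      ([], 0)
    res.1.map (fun x => x - 1)

-- ===== PORT B =====
-- dfs(v, remaining, need, cost): lex-first feasible completion, or none
def dfsB (d : List (List Int)) (limit : Int) : Nat → Int → List Int → Int → Option (List Int)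
  | 0, v, _, cost => if cost + pvBulk d v ≤ limit then some [] else none
  | need+1, v, remaining, cost =>
      (List.range remaining.length).findSome? (fun i =>
        let u := remaining.getD i 0
        (dfsB d limit need u (remaining.eraseIdx i) (cost + pvGetI d v u)).map
          (fun r => u :: r))

-- search(k): first feasible size, counting down with early exit
def searchB (d : List (List Int)) (limit : Int) (bunnies : List Int) : Nat → Option (List Int)
  | 0 => none
  | k+1 =>
      match dfsB d limit (k+1) 0 bunnies 0 with
      | some r => some r
      | none => searchB d limit bunnies k

def solution_alt (times : List (List Int)) (times_limit : Int) : List Int :=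
  let n := times.length
  let d := pvFW times
  if pvNeg d then PySem.List.pyRange 0 ((n : Int) - 2) 1
  else
    let bunnies := PySem.List.pyRange 1 ((n : Int) - 1) 1
    match searchB d times_limit bunnies bunnies.length with
    | none => []
    | some best => (PySem.List.sorted best id false).map (fun x => x - 1)

-- ===== PRECONDITION & SPEC =====
-- Pre_ excludes exactly the inputs where Python A raises IndexError: a row shorter
-- than the matrix (Floyd-Warshall reads column j < len(times) of every row).
def Pre_solution (times : List (List Int)) (times_limit : Int) : Prop :=
  ∀ row ∈ times, times.length ≤ row.length
instance (times : List (List Int)) (times_limit : Int) : Decidable (Pre_solution times times_limit) := by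
  unfold Pre_solution; infer_instance
def pvWitness_solution : List (List Int) × Int := ([[0, 1, 1], [1, 0, 1], [1, 1, 0]], 10)

def Spec_solution (times : List (List Int)) (times_limit : Int) (out : List Int) : Prop := out = solution_alt times times_limit
instance (times : List (List Int)) (times_limit : Int) (out : List Int) : Decidable (Spec_solution times times_limit out) := by unfold Spec_solution; infer_instance

-- ===== CLAIM (what is proved, stated in full; the proofs are below) =====
def Claim_equal_solution : Prop := ∀ (times : List (List Int)) (times_limit : Int), Dom_solution times times_limit → Pre_solution times times_limit → Spec_solution times times_limit (solution times times_limit)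

-- ===== LEMMAS AND PROOFS =====

-- chained path cost from vertex v through p to the bulkhead
def pcost (d : List (List Int)) (v : Int) : List Int → Int
  | [] => pvBulk d v
  | u :: r => pvGetI d v u + pcost d u r

theorem find?_congr_mem {α : Type} {p q : α → Bool} :
    ∀ (l : List α), (∀ x ∈ l, p x = q x) → l.find? p = l.find? q := by
  intro l
  induction l with
  | nil => intro _; rfl
  | cons a l ih =>
      intro h
      simp only [List.find?_cons, h a (by simp)]
      cases q a with
      | true => rfl
      | false => exact ih (fun x hx => h x (by simp [hx]))

theorem find?_flatMap {α β : Type} (f : α → List β) (p : β → Bool) :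
    ∀ (l : List α), (l.flatMap f).find? p = l.findSome? (fun x => (f x).find? p) := by
  intro l
  induction l with
  | nil => rfl
  | cons a l ih =>
      simp [List.flatMap_cons, List.find?_append, List.findSome?_cons, ih]
      cases (f a).find? p <;> simp

theorem costA_aux (d : List (List Int)) :
    ∀ (p : List Int) (u a : Int),
      ((u :: p).zip p).foldl (fun t cn => t + pvGetI d cn.1 cn.2) a
          + pvBulk d ((PySem.List.pyGet? (u :: p) (-1)).getD 0)
        = a + pcost d u p := by
  intro p
  induction p with
  | nil => intro u a; simp [pcost, PySem.List.pyGet?_neg_one]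
  | cons w q ih =>
      intro u a
      have h1 : PySem.List.pyGet? (u :: w :: q) (-1) = PySem.List.pyGet? (w :: q) (-1) := by
        simp [PySem.List.pyGet?_neg_one]
      simp only [List.zip_cons_cons, List.foldl_cons, h1]
      rw [ih w (a + pvGetI d u w)]
      simp [pcost, add_assoc]

theorem costA_chain (d : List (List Int)) (u : Int) (p : List Int) :
    costA d (u :: p) = pvGetI d 0 u + pcost d u p := by
  simpa [costA] using costA_aux d p u (pvGetI d 0 u)

theorem dfsB_eq_find? (d : List (List Int)) (limit : Int) :
    ∀ (need : Nat) (v : Int) (l : List Int) (cost : Int),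
      dfsB d limit need v l cost
        = (permsA need l).find? (fun p => decide (cost + pcost d v p ≤ limit)) := by
  intro need
  induction need with
  | zero =>
      intro v l cost
      simp [dfsB, permsA, pcost]
  | succ need ih =>
      intro v l cost
      simp only [dfsB, permsA, find?_flatMap, List.find?_map]
      congr 1
      funext i
      rw [ih]
      congr 1
      refine find?_congr_mem _ (fun p _ => ?_)
      simp only [Function.comp_apply, pcost, decide_eq_decide]
      omega

theorem perms_ne_nil (k : Nat) (l : List Int) (p : List Int)
    (hp : p ∈ permsA (k+1) l) : p ≠ [] := by
  simp only [permsA, List.mem_flatMap, List.mem_map] at hp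
  obtain ⟨i, _, q, _, rfl⟩ := hp
  simp

-- A's kept-last best answer, as a recursion over the processed sizes
def bestR (d : List (List Int)) (limit : Int) (l : List Int) : Nat → List Int × Nat
  | 0 => ([], 0)
  | s+1 =>
      match (permsA (s+1) l).find? (fun p => decide (costA d p ≤ limit)) with
      | some p => (PySem.List.sorted p id false, s + 1)
      | none => bestR d limit l s

theorem foldl_id_of_ge (d : List (List Int)) (limit : Int) (k : Nat) :
    ∀ (pl : List (List Int)) (st : List Int × Nat), ¬ st.2 < k →
      pl.foldl (fun st p => if costA d p ≤ limit ∧ st.2 < k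
        then (PySem.List.sorted p id false, k) else st) st = st := by
  intro pl
  induction pl with
  | nil => intro st _; rfl
  | cons p pl ih =>
      intro st h
      rw [List.foldl_cons, if_neg (show ¬(costA d p ≤ limit ∧ st.2 < k) from fun hc => h hc.2)]
      exact ih st h

theorem inner_fold (d : List (List Int)) (limit : Int) (k : Nat) :
    ∀ (pl : List (List Int)) (st : List Int × Nat), st.2 < k →
      pl.foldl (fun st p => if costA d p ≤ limit ∧ st.2 < k
          then (PySem.List.sorted p id false, k) else st) st
        = match pl.find? (fun p => decide (costA d p ≤ limit)) with
          | some p => (PySem.List.sorted p id false, k)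
          | none => st := by
  intro pl
  induction pl with
  | nil => intro st _; rfl
  | cons p pl ih =>
      intro st h
      by_cases hp : costA d p ≤ limit
      · rw [List.foldl_cons, if_pos (show costA d p ≤ limit ∧ st.2 < k from ⟨hp, h⟩),
          List.find?_cons, decide_eq_true hp]
        exact foldl_id_of_ge d limit k pl _ (by simp)
      · rw [List.foldl_cons, if_neg (show ¬(costA d p ≤ limit ∧ st.2 < k) from fun hc => hp hc.1),
          List.find?_cons, decide_eq_false hp]
        exact ih st h

theorem bestR_le (d : List (List Int)) (limit : Int) (l : List Int) :
    ∀ s, (bestR d limit l s).2 ≤ s := by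
  intro s
  induction s with
  | zero => simp [bestR]
  | succ s ih =>
      simp only [bestR]
      cases (permsA (s+1) l).find? (fun p => decide (costA d p ≤ limit)) with
      | some p => simp
      | none => simpa using Nat.le_succ_of_le ih

theorem outer_fold (d : List (List Int)) (limit : Int) (l : List Int) :
    ∀ s, (List.range s).foldl (fun (st : List Int × Nat) i =>
        (permsA (i+1) l).foldl (fun st p => if costA d p ≤ limit ∧ st.2 < i+1
          then (PySem.List.sorted p id false, i+1) else st) st) ([], 0)
      = bestR d limit l s := by
  intro s
  induction s with
  | zero => rfl
  | succ s ih =>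
      rw [List.range_succ, List.foldl_append, ih]
      simp only [List.foldl_cons, List.foldl_nil]
      rw [inner_fold d limit (s+1) _ _ (Nat.lt_succ_of_le (bestR_le d limit l s))]
      rfl

theorem dfsB_top (d : List (List Int)) (limit : Int) (l : List Int) (s : Nat) :
    dfsB d limit (s+1) 0 l 0
      = (permsA (s+1) l).find? (fun p => decide (costA d p ≤ limit)) := by
  rw [dfsB_eq_find?]
  refine find?_congr_mem _ (fun p hp => ?_)
  obtain ⟨u, q, rfl⟩ := List.exists_cons_of_ne_nil (perms_ne_nil s l p hp)
  simp only [pcost, costA_chain, decide_eq_decide]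
  omega

theorem search_best (d : List (List Int)) (limit : Int) (l : List Int) :
    ∀ s, (bestR d limit l s).1
      = match searchB d limit l s with
        | some p => PySem.List.sorted p id false
        | none => [] := by
  intro s
  induction s with
  | zero => rfl
  | succ s ih =>
      simp only [bestR, searchB, dfsB_top]
      cases (permsA (s+1) l).find? (fun p => decide (costA d p ≤ limit)) with
      | some p => rfl
      | none => exact ih

-- ===== VERDICT (by name: the statement is the Claim_ definition above) =====
theorem solution_spec : Claim_equal_solution := by
  intro times times_limit _ _
  unfold Spec_solution solution solution_alt
  cases hneg : pvNeg (pvFW times) with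
  | true => simp [hneg]
  | false =>
      have hb : PySem.List.pyRange 1 ((times.length : Int) - 2 + 1) 1
          = PySem.List.pyRange 1 ((times.length : Int) - 1) 1 := by
        have h2 : (times.length : Int) - 2 + 1 = (times.length : Int) - 1 := by omega
        rw [h2]
      simp only [hneg, Bool.false_eq_true, if_false, hb]
      rw [outer_fold, search_best]
      cases searchB (pvFW times) times_limit
          (PySem.List.pyRange 1 ((times.length : Int) - 1) 1)
          (PySem.List.pyRange 1 ((times.length : Int) - 1) 1).length with
      | some p => rfl
      | none => rfl
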